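-- pv_equiv track=rewrite | github.com/rahulraocoder/hackathon-backend | core/scoring.py | score_exact_match_list
-- ===== SOURCE A (Python) =====
-- def score_exact_match_list(participant_list, perfect_list, keys) -> float:
--     """Score exact match on list elements with corresponding position"""
--     score = 0
--     for p, perfect in zip(participant_list, perfect_list):
--         if p.get(keys[0]) == perfect.get(keys[0]):  # Position match
--             score += 6
--         if p.get(keys[1]) == perfect.get(keys[1]):  # Value match
--             score += 3
--         if p.get(keys[2]) == perfect.get(keys[2]):  # Name match
--             score += 1
--     return score
-- ===== SOURCE B (Python) =====
-- def score_exact_match_list(participant_list, perfect_list, keys) -> float: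
--     """Score exact match on list elements with corresponding position.
--
--     Column-wise: one counting pass per weighted key, sum of weight * count."""
--     pairs = list(zip(participant_list, perfect_list))
--     return sum(w * sum(1 for p, perfect in pairs if p.get(k) == perfect.get(k))
--                for w, k in zip((6, 3, 1), keys))
-- ===== Notes on version B (the rewrite author's own statement) =====
-- stated objective: alternative
-- what changed: Row-wise loop with three in-place conditional increments replaced by a column-wise decomposition: one counting pass over the zipped pairs per weighted key, returning the weighted sum of the three counts.
import Mathlib
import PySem

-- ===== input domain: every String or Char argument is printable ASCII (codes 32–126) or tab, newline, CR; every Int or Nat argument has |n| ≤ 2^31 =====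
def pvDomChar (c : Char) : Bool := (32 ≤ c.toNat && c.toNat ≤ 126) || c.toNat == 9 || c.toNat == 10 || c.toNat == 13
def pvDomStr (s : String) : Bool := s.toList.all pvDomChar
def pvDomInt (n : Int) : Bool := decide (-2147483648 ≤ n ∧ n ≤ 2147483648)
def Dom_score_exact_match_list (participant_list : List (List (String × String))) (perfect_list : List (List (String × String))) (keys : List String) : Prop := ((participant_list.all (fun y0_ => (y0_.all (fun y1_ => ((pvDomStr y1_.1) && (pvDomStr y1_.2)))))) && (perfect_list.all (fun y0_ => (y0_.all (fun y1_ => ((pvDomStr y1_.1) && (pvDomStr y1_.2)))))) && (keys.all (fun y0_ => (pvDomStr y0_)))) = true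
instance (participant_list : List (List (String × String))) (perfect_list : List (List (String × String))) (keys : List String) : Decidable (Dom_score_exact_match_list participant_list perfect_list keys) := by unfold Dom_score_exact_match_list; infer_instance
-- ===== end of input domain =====

-- B recomputes the score column-wise: one counting pass per weighted key (6/3/1) summed,
-- instead of A's row-wise loop with three conditional increments; same cost, different decomposition.


-- ===== PORT A =====
-- dicts are association lists; p.get(key) is ported as List.lookup (first match, exact for
-- duplicate-free dict item lists); the `| _,_,_ => score` arm is where Python raises IndexError
-- (excluded by Pre_ below).
def score_exact_match_list (participant_list : List (List (String × String))) (perfect_list : List (List (String × String))) (keys : List String) : Int :=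
  (participant_list.zip perfect_list).foldl (fun score pq =>
    match PySem.List.pyGet? keys 0, PySem.List.pyGet? keys 1, PySem.List.pyGet? keys 2 with
    | some k0, some k1, some k2 =>
        let s1 := if List.lookup k0 pq.1 == List.lookup k0 pq.2 then score + 6 else score
        let s2 := if List.lookup k1 pq.1 == List.lookup k1 pq.2 then s1 + 3 else s1
        if List.lookup k2 pq.1 == List.lookup k2 pq.2 then s2 + 1 else s2
    | _, _, _ => score) 0

-- ===== PORT B =====
def score_exact_match_list_alt (participant_list : List (List (String × String))) (perfect_list : List (List (String × String))) (keys : List String) : Int :=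
  let pairs := participant_list.zip perfect_list
  ((([6, 3, 1] : List Int).zip keys).map (fun wk =>
      wk.1 * ((pairs.filter (fun pq =>
        List.lookup wk.2 pq.1 == List.lookup wk.2 pq.2)).length : Int))).sum

-- ===== PRECONDITION & SPEC =====
-- Pre_ excludes exactly the inputs where A raises IndexError: both lists non-empty with
-- fewer than three keys.
def Pre_score_exact_match_list (participant_list : List (List (String × String))) (perfect_list : List (List (String × String))) (keys : List String) : Prop :=
  participant_list = [] ∨ perfect_list = [] ∨ 3 ≤ keys.length
instance (participant_list : List (List (String × String))) (perfect_list : List (List (String × String))) (keys : List String) : Decidable (Pre_score_exact_match_list participant_list perfect_list keys) := by unfold Pre_score_exact_match_list; infer_instance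
def pvWitness_score_exact_match_list : (List (List (String × String))) × (List (List (String × String))) × List String :=
  ([[("a", "1")]], [[("a", "1")]], ["a", "b", "c"])

def Spec_score_exact_match_list (participant_list : List (List (String × String))) (perfect_list : List (List (String × String))) (keys : List String) (out : Int) : Prop := out = score_exact_match_list_alt participant_list perfect_list keys
instance (participant_list : List (List (String × String))) (perfect_list : List (List (String × String))) (keys : List String) (out : Int) : Decidable (Spec_score_exact_match_list participant_list perfect_list keys out) := by unfold Spec_score_exact_match_list; infer_instance

-- ===== CLAIM (what is proved, stated in full; the proofs are below) =====
def Claim_equal_score_exact_match_list : Prop := ∀ (participant_list : List (List (String × String))) (perfect_list : List (List (String × String))) (keys : List String), Dom_score_exact_match_list participant_list perfect_list keys → Pre_score_exact_match_list participant_list perfect_list keys → Spec_score_exact_match_list participant_list perfect_list keys (score_exact_match_list participant_list perfect_list keys)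

-- ===== LEMMAS AND PROOFS =====
-- A's loop body, with the three key lookups resolved, adds 6/3/1 per matching predicate;
-- this characterises such a fold as three weighted counts.
lemma foldl_score_counts {α : Type} (f g h : α → Bool) (l : List α) (acc : Int) :
    l.foldl (fun s x =>
      let s1 := if f x then s + 6 else s
      let s2 := if g x then s1 + 3 else s1
      if h x then s2 + 1 else s2) acc
    = acc + 6 * (l.countP f : Int) + 3 * (l.countP g : Int) + (l.countP h : Int) := by
  induction l generalizing acc with
  | nil => simp
  | cons x xs ih =>
    simp only [List.foldl_cons, List.countP_cons, ih]
    split_ifs <;> push_cast <;> ring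

-- ===== VERDICT (by name: the statement is the Claim_ definition above) =====
theorem score_exact_match_list_spec : Claim_equal_score_exact_match_list := by
  intro pl ql keys _ hpre
  unfold Spec_score_exact_match_list score_exact_match_list score_exact_match_list_alt
  rcases hpre with h | h | h
  · subst h; simp
  · subst h; simp
  · match keys, h with
    | k0 :: k1 :: k2 :: rest, _ =>
      have h0 : PySem.List.pyGet? (k0 :: k1 :: k2 :: rest) (0 : Int) = some k0 := by
        simp [PySem.List.pyGet?, PySem.List.pyIdx?, show (0:Int) ≤ (rest.length:Int)+1+1 by omega]
      have h1 : PySem.List.pyGet? (k0 :: k1 :: k2 :: rest) (1 : Int) = some k1 := by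
        simp [PySem.List.pyGet?, PySem.List.pyIdx?, show (0:Int) ≤ (rest.length:Int)+1 by omega]
      have h2 : PySem.List.pyGet? (k0 :: k1 :: k2 :: rest) (2 : Int) = some k2 := by
        simp [PySem.List.pyGet?, PySem.List.pyIdx?, show (2:Int) ≤ (rest.length:Int)+1+1 by omega]
      simp only [h0, h1, h2, List.zip_cons_cons, List.zip_nil_left, List.map_cons,
        List.map_nil, List.sum_cons, List.sum_nil, ← List.countP_eq_length_filter]
      rw [foldl_score_counts]
      ring
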